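-- pv_equiv track=rewrite | github.com/yyTang94/extended-triplets-extraction | formal-uncased-baseline/adjust/sentence.py | adjust_sentence
-- ===== SOURCE A (Python) =====
-- from typing import List, Dict
--
-- def _cut_and_pad(s: List[str], max_length: int, pad_token: str):
--
--     s_len = len(s)
--
--     if s_len < max_length:
--         new_s = s + [pad_token] * (max_length - s_len)
--     elif s_len > max_length:
--         new_s = s[0: max_length]
--     else:
--         new_s = s
--
--     return new_s
--
-- def _low_case(s: List[str]):
--
--     cases = []
--     lowed = []
--
--     for token in s:
--         if token.isalpha():
--             if token.isupper():
--                 cases.append(0)  # upper: 0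
--             elif token.istitle():
--                 cases.append(1)  # title: 1
--             elif token.islower():
--                 cases.append(2)  # lower: 2
--             else:
--                 cases.append(3)  # hybird: 3
--         else:
--             cases.append(3)  # hybird
--
--         lowed.append(token.lower())
--
--     return lowed, cases
--
-- def _replace_oov(s: List[str], embeddings: Dict, unk_token: str):
--
--     new_s = []
--
--     for token in s:
--         if token in embeddings:
--             new_s.append(token)
--         else:
--             new_s.append(unk_token)
--
--     return new_s
--
-- def adjust_sentence(sentences: List[List[str]],
--                     max_length: int, pad_token: str,
--                     embeddings: Dict, unk_token: str):
--
--     new_sentences = []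
--     case_seqs = []
--
--     for s in sentences:
--
--         # cut and pad
--         cutted = _cut_and_pad(s, max_length, pad_token)
--
--         # low case
--         lowed, case_seq = _low_case(cutted)
--
--         # replace_oov
--         new_s = _replace_oov(lowed, embeddings, unk_token)
--
--         # append to new_sentences
--         new_sentences.append(new_s)
--         case_seqs.append(case_seq)
--
--     return new_sentences, case_seqs
-- ===== SOURCE B (Python) =====
-- from typing import List, Dict
--
-- def adjust_sentence(sentences: List[List[str]],
--                     max_length: int, pad_token: str,
--                     embeddings: Dict, unk_token: str):
--     # vocabulary as a set of keys, and a memo table: each distinct token is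
--     # classified / lowered / vocab-checked once, across ALL sentences
--     vocab = set(embeddings)
--     cache = {}
--     new_sentences = []
--     case_seqs = []
--     for s in sentences:
--         fitted = s[0:max_length] + [pad_token] * (max_length - len(s))
--         new_s = []
--         case_seq = []
--         for token in fitted:
--             info = cache.get(token)
--             if info is None:
--                 if token.isalpha():
--                     tag = 0 if token.isupper() else 1 if token.istitle() else 2 if token.islower() else 3
--                 else:
--                     tag = 3
--                 low = token.lower()
--                 info = (low if low in vocab else unk_token, tag)
--                 cache[token] = info
--             new_s.append(info[0])
--             case_seq.append(info[1])
--         new_sentences.append(new_s)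
--         case_seqs.append(case_seq)
--     return new_sentences, case_seqs
-- ===== Notes on version B (the rewrite author's own statement) =====
-- stated objective: alternative
-- what changed: B precomputes the vocabulary as a set and memoizes per-token results (case tag + lowered/OOV-substituted form) in a dictionary shared across all sentences, replacing A's three per-sentence passes that reclassify and re-lookup every token occurrence; the pad/truncate step becomes one branch-free slice+pad expression.
import Mathlib
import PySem

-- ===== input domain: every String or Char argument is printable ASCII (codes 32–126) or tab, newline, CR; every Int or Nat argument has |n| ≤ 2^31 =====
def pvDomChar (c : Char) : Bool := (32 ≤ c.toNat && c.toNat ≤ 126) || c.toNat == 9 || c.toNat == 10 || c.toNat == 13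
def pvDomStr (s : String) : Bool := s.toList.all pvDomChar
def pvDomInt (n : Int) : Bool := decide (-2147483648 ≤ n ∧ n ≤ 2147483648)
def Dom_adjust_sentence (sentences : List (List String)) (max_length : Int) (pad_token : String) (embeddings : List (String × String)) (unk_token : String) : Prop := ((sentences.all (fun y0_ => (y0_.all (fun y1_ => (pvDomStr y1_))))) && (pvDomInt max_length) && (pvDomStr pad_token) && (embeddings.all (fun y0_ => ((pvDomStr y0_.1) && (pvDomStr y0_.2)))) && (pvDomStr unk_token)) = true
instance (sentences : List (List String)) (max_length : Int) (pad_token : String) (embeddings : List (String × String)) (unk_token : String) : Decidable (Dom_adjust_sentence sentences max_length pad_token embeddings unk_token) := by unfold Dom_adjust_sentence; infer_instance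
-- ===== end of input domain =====

-- B builds the vocabulary as a set once and memoizes per-token results in a dictionary shared
-- across all sentences, instead of A's three per-sentence passes (objective: alternative).

-- Shared character-class helpers (hand ports of Python str.isupper/istitle/islower, exact on the
-- ASCII domain where the only cased characters are the letters; PySem has only the char level).
-- s.isupper(): at least one cased character and no lowercase cased character.
def pyStrIsupper (s : String) : Bool :=
  s.toList.any PySem.Chars.isalpha && s.toList.all (fun c => !(PySem.Chars.islower c))

-- s.islower(): at least one cased character and no uppercase cased character.
def pyStrIslower (s : String) : Bool :=
  s.toList.any PySem.Chars.isalpha && s.toList.all (fun c => !(PySem.Chars.isupper c))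

-- s.istitle() on ASCII: uppercase letters only after an uncased char, lowercase only after a cased
-- char, and at least one cased char; state (prevCased, seenCased).
def pyIstitleGo (cs : List Char) (prevCased seen : Bool) : Bool :=
  match cs with
  | [] => seen
  | c :: rest =>
    if PySem.Chars.isupper c then
      if prevCased then false else pyIstitleGo rest true true
    else if PySem.Chars.islower c then
      if prevCased then pyIstitleGo rest true true else false
    else pyIstitleGo rest false seen

def pyStrIstitle (s : String) : Bool := pyIstitleGo s.toList false false

-- case tag of a token, the branch order of the Python
def pvCaseTag (token : String) : Int :=
  if PySem.Str.strIsalpha token then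
    if pyStrIsupper token then 0
    else if pyStrIstitle token then 1
    else if pyStrIslower token then 2
    else 3
  else 3

-- ===== PORT A =====
def pvCutAndPad (s : List String) (max_length : Int) (pad_token : String) : List String :=
  let s_len : Int := s.length
  if s_len < max_length then s ++ List.replicate (max_length - s_len).toNat pad_token
  else if s_len > max_length then PySem.List.slice s (some 0) (some max_length)
  else s

def pvLowCase (s : List String) : List String × List Int :=
  s.foldl (fun acc token =>
    (acc.1 ++ [PySem.Str.lower token], acc.2 ++ [pvCaseTag token])) ([], [])

def pvReplaceOov (s : List String) (embeddings : List (String × String)) (unk_token : String) : List String :=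
  s.foldl (fun acc token =>
    acc ++ [if embeddings.any (fun p => p.1 == token) then token else unk_token]) []

def adjust_sentence (sentences : List (List String)) (max_length : Int) (pad_token : String) (embeddings : List (String × String)) (unk_token : String) : List (List String) × List (List Int) :=
  sentences.foldl (fun acc s =>
    let cutted := pvCutAndPad s max_length pad_token
    let lc := pvLowCase cutted
    let new_s := pvReplaceOov lc.1 embeddings unk_token
    (acc.1 ++ [new_s], acc.2 ++ [lc.2])) ([], [])

-- ===== PORT B =====
-- inner per-token step: lookup in the memo cache, computing and inserting on a miss
def pvTokStep (vocab : PySem.Set String) (unk_token : String)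
    (q : PySem.Dict String (String × Int) × List String × List Int) (token : String) :
    PySem.Dict String (String × Int) × List String × List Int :=
  match q.1.get? token with
  | some info => (q.1, q.2.1 ++ [info.1], q.2.2 ++ [info.2])
  | none =>
    let tag := if PySem.Str.strIsalpha token then
        (if pyStrIsupper token then (0:Int) else if pyStrIstitle token then 1
         else if pyStrIslower token then 2 else 3)
      else 3
    let low := PySem.Str.lower token
    let info := (if PySem.Set.contains vocab low then low else unk_token, tag)
    (q.1.insert token info, q.2.1 ++ [info.1], q.2.2 ++ [info.2])

def adjust_sentence_alt (sentences : List (List String)) (max_length : Int) (pad_token : String) (embeddings : List (String × String)) (unk_token : String) : List (List String) × List (List Int) :=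
  let vocab : PySem.Set String := PySem.Set.ofList (embeddings.map Prod.fst)
  let r := sentences.foldl (fun st s =>
    let fitted := PySem.List.slice s (some 0) (some max_length) ++
                  List.replicate (max_length - (s.length : Int)).toNat pad_token
    let inner := fitted.foldl (pvTokStep vocab unk_token) (st.1, [], [])
    (inner.1, st.2.1 ++ [inner.2.1], st.2.2 ++ [inner.2.2]))
    (PySem.Dict.empty, ([], []))
  (r.2.1, r.2.2)

-- ===== PRECONDITION & SPEC =====
def Spec_adjust_sentence (sentences : List (List String)) (max_length : Int) (pad_token : String) (embeddings : List (String × String)) (unk_token : String) (out : List (List String) × List (List Int)) : Prop := out = adjust_sentence_alt sentences max_length pad_token embeddings unk_token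
instance (sentences : List (List String)) (max_length : Int) (pad_token : String) (embeddings : List (String × String)) (unk_token : String) (out : List (List String) × List (List Int)) : Decidable (Spec_adjust_sentence sentences max_length pad_token embeddings unk_token out) := by unfold Spec_adjust_sentence; infer_instance

-- ===== CLAIM (what is proved, stated in full; the proofs are below) =====
def Claim_equal_adjust_sentence : Prop := ∀ (sentences : List (List String)) (max_length : Int) (pad_token : String) (embeddings : List (String × String)) (unk_token : String), Dom_adjust_sentence sentences max_length pad_token embeddings unk_token → Spec_adjust_sentence sentences max_length pad_token embeddings unk_token (adjust_sentence sentences max_length pad_token embeddings unk_token)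

-- ===== LEMMAS AND PROOFS =====

-- the per-token value B's cache memoizes
def pvInfo (embeddings : List (String × String)) (unk_token : String) (token : String) : String × Int :=
  (if embeddings.any (fun p => p.1 == PySem.Str.lower token) then PySem.Str.lower token else unk_token,
   pvCaseTag token)

-- B's set-of-keys membership agrees with A's first-match scan of the association list
theorem vocab_contains_eq (embeddings : List (String × String)) (x : String) :
    PySem.Set.contains (PySem.Set.ofList (embeddings.map Prod.fst)) x =
      embeddings.any (fun p => p.1 == x) := by
  rw [Bool.eq_iff_iff]
  simp [PySem.Set.contains, PySem.Set.mem_ofList, List.any_eq_true, List.mem_map, beq_iff_eq]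

-- cache invariant: every stored entry is the memoized value
def pvCacheOk (embeddings : List (String × String)) (unk_token : String)
    (d : PySem.Dict String (String × Int)) : Prop :=
  ∀ k v, d.get? k = some v → v = pvInfo embeddings unk_token k

theorem tokStep_eq (embeddings : List (String × String)) (unk_token : String)
    (d : PySem.Dict String (String × Int)) (o1 : List String) (o2 : List Int) (token : String)
    (h : pvCacheOk embeddings unk_token d) :
    ∃ d', pvCacheOk embeddings unk_token d' ∧
      pvTokStep (PySem.Set.ofList (embeddings.map Prod.fst)) unk_token (d, o1, o2) token =
        (d', o1 ++ [(pvInfo embeddings unk_token token).1], o2 ++ [(pvInfo embeddings unk_token token).2]) := by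
  unfold pvTokStep
  cases hg : d.get? token with
  | some info =>
    exact ⟨d, h, by simp [h token info hg]⟩
  | none =>
    refine ⟨d.insert token (pvInfo embeddings unk_token token), ?_, ?_⟩
    · intro k v hv
      rw [PySem.Dict.get?_insert] at hv
      split_ifs at hv with hk
      · cases hv; subst hk; rfl
      · exact h k v hv
    · simp only [vocab_contains_eq]
      rfl

-- the inner fold over a token list appends the memoized values and preserves the invariant
theorem inner_fold_eq (embeddings : List (String × String)) (unk_token : String) :
    ∀ (tokens : List String) (d : PySem.Dict String (String × Int)) (o1 : List String) (o2 : List Int),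
    pvCacheOk embeddings unk_token d →
    ∃ d', pvCacheOk embeddings unk_token d' ∧
      tokens.foldl (pvTokStep (PySem.Set.ofList (embeddings.map Prod.fst)) unk_token) (d, o1, o2) =
        (d', o1 ++ tokens.map (fun t => (pvInfo embeddings unk_token t).1),
             o2 ++ tokens.map (fun t => (pvInfo embeddings unk_token t).2)) := by
  intro tokens
  induction tokens with
  | nil => intro d o1 o2 h; exact ⟨d, h, by simp⟩
  | cons t ts ih =>
    intro d o1 o2 h
    obtain ⟨d1, h1, hstep⟩ := tokStep_eq embeddings unk_token d o1 o2 t h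
    obtain ⟨d2, h2, hrest⟩ := ih d1 (o1 ++ [(pvInfo embeddings unk_token t).1])
      (o2 ++ [(pvInfo embeddings unk_token t).2]) h1
    refine ⟨d2, h2, ?_⟩
    simp only [List.foldl_cons, hstep, hrest, List.map_cons, List.append_assoc,
      List.singleton_append]

-- a fold that pushes one element per input equals a map
theorem foldl_push {α β : Type} (f : α → β) : ∀ (l : List α) (init : List β),
    l.foldl (fun a x => a ++ [f x]) init = init ++ l.map f := by
  intro l
  induction l with
  | nil => simp
  | cons x xs ih => intro init; simp [List.foldl, ih]

-- a fold pushing into both components equals a pair of maps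
theorem foldl_push2 {α β γ : Type} (f : α → β) (g : α → γ) : ∀ (l : List α) (i1 : List β) (i2 : List γ),
    l.foldl (fun p x => (p.1 ++ [f x], p.2 ++ [g x])) (i1, i2) = (i1 ++ l.map f, i2 ++ l.map g) := by
  intro l
  induction l with
  | nil => simp
  | cons x xs ih => intro i1 i2; simp [List.foldl, ih]

theorem cutAndPad_eq (s : List String) (m : Int) (p : String) :
    pvCutAndPad s m p =
      PySem.List.slice s (some 0) (some m) ++ List.replicate (m - (s.length : Int)).toNat p := by
  have hs : ∀ (b : Nat), s.length ≤ b → PySem.List.slice s (some 0) (some (b : Int)) = s := by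
    intro b hb
    rw [show (0 : Int) = ((0 : Nat) : Int) from rfl]
    simp only [PySem.List.slice_natCast, List.drop_zero]
    exact List.take_of_length_le (by omega)
  unfold pvCutAndPad
  dsimp only
  split_ifs with h1 h2
  · rw [show m = ((m.toNat : Nat) : Int) by omega, hs m.toNat (by omega)]
  · have : (m - (s.length : Int)).toNat = 0 := by omega
    simp [this]
  · have hm : m = (s.length : Int) := by omega
    subst hm
    simp [hs s.length (le_refl _)]

-- A's three per-sentence passes compute the maps of the memoized value over the fitted sentence
theorem perSentence_eq (s : List String) (m : Int) (p : String)
    (embeddings : List (String × String)) (unk : String) :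
    (pvReplaceOov (pvLowCase (pvCutAndPad s m p)).1 embeddings unk,
     (pvLowCase (pvCutAndPad s m p)).2) =
    ((PySem.List.slice s (some 0) (some m) ++ List.replicate (m - (s.length : Int)).toNat p).map
       (fun t => (pvInfo embeddings unk t).1),
     (PySem.List.slice s (some 0) (some m) ++ List.replicate (m - (s.length : Int)).toNat p).map
       (fun t => (pvInfo embeddings unk t).2)) := by
  rw [← cutAndPad_eq]
  generalize pvCutAndPad s m p = cs
  unfold pvLowCase pvReplaceOov
  rw [foldl_push2 (f := PySem.Str.lower) (g := pvCaseTag),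
      foldl_push (f := fun token => if embeddings.any (fun r => r.1 == token) then token else unk)]
  simp [List.map_map, Function.comp, pvInfo]

-- the outer folds agree, threading the cache invariant and identical accumulated outputs
theorem outer_eq (m : Int) (p : String) (emb : List (String × String)) (unk : String) :
    ∀ (l : List (List String)) (d : PySem.Dict String (String × Int))
      (a1 : List (List String)) (a2 : List (List Int)),
    pvCacheOk emb unk d →
    ∃ d', (l.foldl (fun st s =>
        let fitted := PySem.List.slice s (some 0) (some m) ++
                      List.replicate (m - (s.length : Int)).toNat p
        let inner := fitted.foldl (pvTokStep (PySem.Set.ofList (emb.map Prod.fst)) unk) (st.1, [], [])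
        (inner.1, st.2.1 ++ [inner.2.1], st.2.2 ++ [inner.2.2])) (d, a1, a2)) =
      (d', (l.foldl (fun acc s =>
        let cutted := pvCutAndPad s m p
        let lc := pvLowCase cutted
        let new_s := pvReplaceOov lc.1 emb unk
        (acc.1 ++ [new_s], acc.2 ++ [lc.2])) (a1, a2))) := by
  intro l
  induction l with
  | nil => intro d a1 a2 h; exact ⟨d, rfl⟩
  | cons s ss ih =>
    intro d a1 a2 h
    obtain ⟨d1, h1, hin⟩ := inner_fold_eq emb unk
      (PySem.List.slice s (some 0) (some m) ++ List.replicate (m - (s.length : Int)).toNat p)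
      d [] [] h
    obtain ⟨d', hrest⟩ := ih d1 (a1 ++ [pvReplaceOov (pvLowCase (pvCutAndPad s m p)).1 emb unk])
      (a2 ++ [(pvLowCase (pvCutAndPad s m p)).2]) h1
    refine ⟨d', ?_⟩
    have h := perSentence_eq s m p emb unk
    have hA := congrArg Prod.fst h
    have hB := congrArg Prod.snd h
    dsimp only at hA hB
    simp only [List.foldl_cons, hin, List.nil_append, ← hA, ← hB]
    exact hrest

-- ===== VERDICT (by name: the statement is the Claim_ definition above) =====
theorem adjust_sentence_spec : Claim_equal_adjust_sentence := by
  intro sentences max_length pad_token embeddings unk_token _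
  unfold Spec_adjust_sentence adjust_sentence adjust_sentence_alt
  obtain ⟨d', hd⟩ := outer_eq max_length pad_token embeddings unk_token sentences
    PySem.Dict.empty [] [] (by intro k v hv; simp [PySem.Dict.get?_empty] at hv)
  simp only [hd]
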